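-- pv_equiv track=rewrite | github.com/nanaboat1/Rose | bfs.py | myTraverse
-- ===== SOURCE A (Python) =====
-- def myTraverse(graph, start, end, path=[]) -> int:
--
--     # path of traversal
--     path = path + [start]
--
--     if start == end:
--         return len(path[:-1])
--
--     if start not in graph:
--         return None
--
--     for node in graph[start]:
--
--         # prevent revisit of seen nodes.
--         if node not in path:
--             newpath = myTraverse(graph,node,end,path)
--
--             if newpath: return newpath
--
--     return None
-- ===== SOURCE B (Python) =====
-- def myTraverse(graph, start, end, path=[]) -> int:
--     # Iterative DFS with an explicit stack of (node, path-prefix) frames;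
--     # neighbors are pushed in reverse so pop order matches the recursion's
--     # left-to-right preorder.
--     stack = [(start, path)]
--     while stack:
--         node, prefix = stack.pop()
--         cur = prefix + [node]
--         if node == end:
--             return len(cur) - 1
--         if node not in graph:
--             continue
--         for nb in reversed(graph[node]):
--             if nb not in cur:
--                 stack.append((nb, cur))
--     return None
-- ===== Notes on version B (the rewrite author's own statement) =====
-- stated objective: alternative
-- what changed: Replaced the recursive DFS (with a per-call loop over neighbors and truthiness-based result propagation) by an iterative DFS over an explicit stack of (node, path-prefix) frames, pushing unvisited neighbors in reverse so pop order reproduces the recursion's left-to-right first-path search.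
import Mathlib
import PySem

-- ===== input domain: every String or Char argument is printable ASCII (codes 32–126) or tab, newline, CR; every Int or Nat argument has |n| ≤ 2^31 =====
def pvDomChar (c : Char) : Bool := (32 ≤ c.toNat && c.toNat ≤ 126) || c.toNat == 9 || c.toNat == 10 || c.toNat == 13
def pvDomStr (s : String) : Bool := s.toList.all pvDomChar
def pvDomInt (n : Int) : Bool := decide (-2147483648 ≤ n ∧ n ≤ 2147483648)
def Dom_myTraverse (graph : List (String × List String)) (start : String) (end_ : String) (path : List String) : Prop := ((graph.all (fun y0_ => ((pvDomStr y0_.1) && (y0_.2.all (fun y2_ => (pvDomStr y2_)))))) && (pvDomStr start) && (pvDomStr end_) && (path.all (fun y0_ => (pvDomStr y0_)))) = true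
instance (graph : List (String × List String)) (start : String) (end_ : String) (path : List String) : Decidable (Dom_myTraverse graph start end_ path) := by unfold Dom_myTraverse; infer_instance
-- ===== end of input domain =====

-- B replaces A's recursive DFS by an iterative explicit-stack DFS (same first-path result);
-- objective: alternative decomposition, no speed claim.

-- all strings occurring as a neighbor anywhere in the graph (termination measure support)
def pvAllNbrs (graph : List (String × List String)) : List String := graph.flatMap Prod.snd

-- number of potential fresh nodes left relative to a path q (termination measure)
def pvFL (graph : List (String × List String)) (q : List String) : Nat :=
  ((pvAllNbrs graph).filter (fun x => decide (x ∉ q))).length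

-- every neighbor list obtained by a dict lookup consists of elements of pvAllNbrs
theorem pvMem_allNbrs {graph : List (String × List String)} {s : String} {nbrs : List String}
    (h : graph.lookup s = some nbrs) : ∀ x ∈ nbrs, x ∈ pvAllNbrs graph := by
  induction graph with
  | nil => simp [List.lookup] at h
  | cons kv t ih =>
    intro x hx
    by_cases hk : s == kv.1
    · rw [List.lookup, hk] at h
      simp at h
      subst h
      simp [pvAllNbrs, List.flatMap]
      exact Or.inl hx
    · rw [List.lookup, Bool.eq_false_iff.mpr hk] at h
      have := ih h x hx
      simp [pvAllNbrs, List.flatMap] at this ⊢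
      exact Or.inr this

theorem pvLen_nbrs_le {graph : List (String × List String)} {s : String} {nbrs : List String}
    (h : graph.lookup s = some nbrs) : nbrs.length ≤ (pvAllNbrs graph).length := by
  induction graph with
  | nil => simp [List.lookup] at h
  | cons kv t ih =>
    by_cases hk : s == kv.1
    · rw [List.lookup, hk] at h
      simp at h
      subst h
      simp [pvAllNbrs, List.flatMap]
    · rw [List.lookup, Bool.eq_false_iff.mpr hk] at h
      have := ih h
      simp [pvAllNbrs, List.flatMap] at this ⊢
      omega

-- a filter by a strictly stronger predicate that loses a witness is strictly shorter
theorem pvFilter_length_lt {α : Type} (p p' : α → Bool) (himp : ∀ y, p' y = true → p y = true) :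
    ∀ (l : List α) (x : α), x ∈ l → p x = true → p' x = false →
      (l.filter p').length < (l.filter p).length := by
  intro l
  induction l with
  | nil => simp
  | cons a t ih =>
    intro x hx hpx hp'x
    have hmono : (t.filter p').length ≤ (t.filter p).length :=
      List.Sublist.length_le (List.monotone_filter_right t himp)
    rw [List.filter_cons, List.filter_cons]
    rcases List.mem_cons.mp hx with rfl | hxt
    · simp only [hpx, hp'x, Bool.false_eq_true, if_true, if_false, List.length_cons]
      omega
    · cases hpa : p a <;> cases hp'a : p' a
      · simp only [Bool.false_eq_true, if_false]
        exact ih x hxt hpx hp'x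
      · exact absurd (himp a hp'a) (by simp [hpa])
      · simp only [Bool.false_eq_true, if_false, if_true, List.length_cons]
        have := ih x hxt hpx hp'x; omega
      · simp only [if_true, List.length_cons]
        have := ih x hxt hpx hp'x; omega

-- extending the path by a fresh node from pvAllNbrs strictly decreases pvFL
theorem pvFL_lt {graph : List (String × List String)} {q : List String} {x : String}
    (hx : x ∈ pvAllNbrs graph) (hq : x ∉ q) : pvFL graph (q ++ [x]) < pvFL graph q := by
  unfold pvFL
  refine pvFilter_length_lt _ _ (fun y hy => ?_) _ x hx (by simpa using hq) (by simp)
  simp at hy ⊢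
  exact hy.1

-- ===== PORT A =====
-- literal transliteration of the recursive Python A; the loop over graph[start] is the
-- mutual helper myTraverseLoop; `if newpath:` is the truthiness test np.getD 0 ≠ 0;
-- the extra hypothesis argument of the loop is proof-only (needed for termination).
mutual
def myTraverse (graph : List (String × List String)) (start : String) (end_ : String) (path : List String) : Option Int :=
  -- path = path + [start]
  let path2 := path ++ [start]
  if start = end_ then
    some ((PySem.List.slice path2 none (some (-1))).length : Int)  -- len(path[:-1])
  else
    match h : graph.lookup start with   -- start not in graph / graph[start]
    | none => none
    | some nbrs => myTraverseLoop graph end_ path2 nbrs (pvMem_allNbrs h)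
termination_by pvFL graph (path ++ [start]) * ((pvAllNbrs graph).length + 1) + (pvAllNbrs graph).length + 1
decreasing_by
  have := pvLen_nbrs_le h
  omega

def myTraverseLoop (graph : List (String × List String)) (end_ : String) (path2 : List String)
    (nbrs : List String) (hm : ∀ x ∈ nbrs, x ∈ pvAllNbrs graph) : Option Int :=
  match nbrs with
  | [] => none
  | node :: rest =>
    if node ∈ path2 then
      myTraverseLoop graph end_ path2 rest (fun x hx => hm x (List.mem_cons_of_mem _ hx))
    else
      let np := myTraverse graph node end_ path2
      if np.getD 0 ≠ 0 then np
      else myTraverseLoop graph end_ path2 rest (fun x hx => hm x (List.mem_cons_of_mem _ hx))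
termination_by pvFL graph path2 * ((pvAllNbrs graph).length + 1) + nbrs.length
decreasing_by
  · simp
  · have hlt : pvFL graph (path2 ++ [node]) < pvFL graph path2 :=
      pvFL_lt (hm node (List.mem_cons_self)) (by assumption)
    have h1 : (pvFL graph (path2 ++ [node]) + 1) * ((pvAllNbrs graph).length + 1)
        ≤ pvFL graph path2 * ((pvAllNbrs graph).length + 1) :=
      Nat.mul_le_mul_right _ hlt
    have h2 : 0 < (node :: rest).length := by simp
    nlinarith
  · simp
end

-- ===== PORT B =====
-- pvWeight/pvSW: termination measure for the explicit-stack loop (sum of exponential weights)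
def pvWeight (graph : List (String × List String)) (e : String × List String) : Nat :=
  ((pvAllNbrs graph).length + 2) ^ (pvFL graph (e.2 ++ [e.1]) + 1)

def pvSW (graph : List (String × List String)) (stack : List (String × List String)) : Nat :=
  (stack.map (pvWeight graph)).sum

-- the reversed push loop of Source B equals prepending the filtered children (head = first neighbor)
theorem pvFoldPush (cur : List String) (nbrs : List String) (rest : List (String × List String)) :
    nbrs.reverse.foldl (fun st c => if c ∈ cur then st else (c, cur) :: st) rest
      = ((nbrs.filter (fun c => decide (c ∉ cur))).map (fun c => (c, cur))) ++ rest := by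
  induction nbrs with
  | nil => simp
  | cons n t ih =>
    rw [List.reverse_cons, List.foldl_append]
    simp only [List.foldl_cons, List.foldl_nil, ih, List.filter_cons]
    by_cases hn : n ∈ cur
    · simp [hn]
    · simp [hn]

-- popping a frame and pushing its filtered children strictly decreases pvSW
theorem pvSW_push_lt (graph : List (String × List String)) (node : String) (pre : List String)
    (nbrs : List String) (h : graph.lookup node = some nbrs)
    (rest : List (String × List String)) :
    pvSW graph (((nbrs.filter (fun c => decide (c ∉ pre ++ [node]))).map (fun c => (c, pre ++ [node]))) ++ rest)
      < pvSW graph ((node, pre) :: rest) := by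
  set cur := pre ++ [node] with hcur
  set M := (pvAllNbrs graph).length with hM
  unfold pvSW
  rw [List.map_append, List.sum_append, List.map_cons, List.sum_cons]
  have hbound : ∀ w ∈ ((nbrs.filter (fun c => decide (c ∉ cur))).map (fun c => (c, cur))).map (pvWeight graph),
      w ≤ (M + 2) ^ (pvFL graph cur) := by
    intro w hw
    simp only [List.map_map, List.mem_map, Function.comp] at hw
    obtain ⟨c, hc, rfl⟩ := hw
    have hc' := List.mem_filter.mp hc
    have hcn : c ∉ cur := by simpa using hc'.2
    have hlt : pvFL graph (cur ++ [c]) < pvFL graph cur :=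
      pvFL_lt (pvMem_allNbrs h c hc'.1) hcn
    show (M + 2) ^ (pvFL graph (cur ++ [c]) + 1) ≤ (M + 2) ^ (pvFL graph cur)
    exact Nat.pow_le_pow_right (by omega) (by omega)
  have hsum : (((nbrs.filter (fun c => decide (c ∉ cur))).map (fun c => (c, cur))).map (pvWeight graph)).sum
      ≤ ((nbrs.filter (fun c => decide (c ∉ cur))).map (fun c => (c, cur))).length * ((M + 2) ^ (pvFL graph cur)) := by
    have := List.sum_le_card_nsmul (((nbrs.filter (fun c => decide (c ∉ cur))).map (fun c => (c, cur))).map (pvWeight graph)) _ hbound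
    simpa [smul_eq_mul] using this
  have hlen : ((nbrs.filter (fun c => decide (c ∉ cur))).map (fun c => (c, cur))).length ≤ M := by
    have h1 : (nbrs.filter (fun c => decide (c ∉ cur))).length ≤ nbrs.length := List.length_filter_le _ _
    have h2 := pvLen_nbrs_le h
    simp only [List.length_map]
    omega
  have hpow : (M) * ((M + 2) ^ (pvFL graph cur)) < (M + 2) ^ (pvFL graph cur + 1) := by
    rw [pow_succ]
    have hp : 0 < (M + 2) ^ (pvFL graph cur) := Nat.pow_pos (by omega)
    nlinarith
  have hw : pvWeight graph (node, pre) = (M + 2) ^ (pvFL graph cur + 1) := by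
    unfold pvWeight; rfl
  have : (((nbrs.filter (fun c => decide (c ∉ cur))).map (fun c => (c, cur))).map (pvWeight graph)).sum
      < (M + 2) ^ (pvFL graph cur + 1) := by
    calc _ ≤ _ := hsum
    _ ≤ M * ((M + 2) ^ (pvFL graph cur)) := Nat.mul_le_mul_right _ hlen
    _ < _ := hpow
  omega

-- transliteration of Source B's while-loop; stack head = top of the Python list
def myTraverseGo (graph : List (String × List String)) (end_ : String)
    (stack : List (String × List String)) : Option Int :=
  match stack with
  | [] => none
  | (node, pre) :: rest =>
    let cur := pre ++ [node]
    if node = end_ then some ((cur.length : Int) - 1)   -- len(cur) - 1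
    else
      match h : graph.lookup node with
      | none => myTraverseGo graph end_ rest             -- continue
      | some nbrs =>                                     -- for nb in reversed(graph[node]): push
        myTraverseGo graph end_
          (nbrs.reverse.foldl (fun st c => if c ∈ cur then st else (c, cur) :: st) rest)
termination_by pvSW graph stack
decreasing_by
  · have hpos : 0 < pvWeight graph (node, pre) := by
      unfold pvWeight; exact Nat.pow_pos (by omega)
    simp only [pvSW, List.map_cons, List.sum_cons]
    omega
  · simp only [dite_eq_ite]
    rw [pvFoldPush]
    exact pvSW_push_lt graph node pre nbrs h rest

def myTraverse_alt (graph : List (String × List String)) (start : String) (end_ : String) (path : List String) : Option Int :=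
  myTraverseGo graph end_ [(start, path)]

-- ===== PRECONDITION & SPEC =====
def Spec_myTraverse (graph : List (String × List String)) (start : String) (end_ : String) (path : List String) (out : Option Int) : Prop := out = myTraverse_alt graph start end_ path
instance (graph : List (String × List String)) (start : String) (end_ : String) (path : List String) (out : Option Int) : Decidable (Spec_myTraverse graph start end_ path out) := by unfold Spec_myTraverse; infer_instance

-- ===== CLAIM (what is proved, stated in full; the proofs are below) =====
def Claim_equal_myTraverse : Prop := ∀ (graph : List (String × List String)) (start : String) (end_ : String) (path : List String), Dom_myTraverse graph start end_ path → Spec_myTraverse graph start end_ path (myTraverse graph start end_ path)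

-- ===== LEMMAS AND PROOFS =====

-- A's loop result, when a value, is at least the length of the current path
theorem pvALoop_pos (graph : List (String × List String)) (end_ : String) (path2 : List String)
    (k : Nat) (hk : pvFL graph path2 ≤ k)
    (IH : ∀ j, j < k → ∀ s p v, pvFL graph (p ++ [s]) ≤ j →
      myTraverse graph s end_ p = some v → (p.length : Int) ≤ v) :
    ∀ nbrs (hm : ∀ x ∈ nbrs, x ∈ pvAllNbrs graph) v,
      myTraverseLoop graph end_ path2 nbrs hm = some v → (path2.length : Int) ≤ v := by
  intro nbrs
  induction nbrs with
  | nil =>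
    intro hm v h
    rw [myTraverseLoop.eq_def] at h
    simp at h
  | cons node rest ih =>
    intro hm v h
    rw [myTraverseLoop.eq_def] at h
    simp only [] at h
    by_cases hmem : node ∈ path2
    · rw [if_pos hmem] at h
      exact ih _ v h
    · rw [if_neg hmem] at h
      cases hA : myTraverse graph node end_ path2 with
      | none =>
        simp only [hA, Option.getD_none, ne_eq, not_true_eq_false, if_false] at h
        exact ih _ v h
      | some w =>
        have hj : pvFL graph (path2 ++ [node]) < k :=
          lt_of_lt_of_le (pvFL_lt (hm node List.mem_cons_self) hmem) hk
        have hw := IH _ hj node path2 w (le_refl _) hA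
        by_cases hw0 : w = 0
        · simp only [hA, hw0, Option.getD_some, ne_eq, not_true_eq_false, if_false] at h
          exact ih _ v h
        · simp only [hA, Option.getD_some, ne_eq, hw0, not_false_eq_true, if_true,
            Option.some.injEq] at h
          omega

-- A's result, when a value, is at least the length of the path prefix (so the
-- truthiness test `if newpath:` inside the loop is just an is-some test).
theorem pvA_pos (graph : List (String × List String)) (end_ : String) :
    ∀ k start path v, pvFL graph (path ++ [start]) ≤ k →
      myTraverse graph start end_ path = some v → (path.length : Int) ≤ v := by
  intro k
  induction k using Nat.strong_induction_on with
  | _ k IH =>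
    intro start path v hk hA
    rw [myTraverse.eq_def] at hA
    by_cases hse : start = end_
    · simp only [if_pos hse] at hA
      rw [PySem.List.slice_to_neg_one, List.dropLast_concat] at hA
      have hv : ((path.length : Int)) = v := by
        injection hA
      omega
    · simp only [if_neg hse] at hA
      split at hA
      · exact absurd hA (by simp)
      · rename_i nbrs hlk
        have hloop := pvALoop_pos graph end_ (path ++ [start]) k hk
          (fun j hj => IH j hj) nbrs (pvMem_allNbrs hlk) v hA
        rw [List.length_append] at hloop
        push_cast at hloop ⊢
        omega

-- expanding the pushed children one frame at a time mirrors A's neighbor loop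
theorem pvGoLoop (graph : List (String × List String)) (end_ : String) (cur : List String)
    (rest : List (String × List String)) (k : Nat) (hcur : cur ≠ []) (hk : pvFL graph cur ≤ k)
    (IH : ∀ j, j < k → ∀ node pre rest', pvFL graph (pre ++ [node]) ≤ j →
      myTraverseGo graph end_ ((node, pre) :: rest')
        = match myTraverse graph node end_ pre with
          | some v => some v
          | none => myTraverseGo graph end_ rest') :
    ∀ nbrs (hm : ∀ x ∈ nbrs, x ∈ pvAllNbrs graph),
      myTraverseGo graph end_
          (((nbrs.filter (fun c => decide (c ∉ cur))).map (fun c => (c, cur))) ++ rest)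
        = match myTraverseLoop graph end_ cur nbrs hm with
          | some v => some v
          | none => myTraverseGo graph end_ rest := by
  intro nbrs
  induction nbrs with
  | nil =>
    intro hm
    rw [myTraverseLoop.eq_def]
    simp
  | cons node t ih =>
    intro hm
    rw [myTraverseLoop.eq_def]
    by_cases hmem : node ∈ cur
    · have hd : (decide (node ∉ cur)) = false := by simp [hmem]
      simp only [List.filter_cons, hd, Bool.false_eq_true, if_false, if_pos hmem]
      exact ih _
    · have hd : (decide (node ∉ cur)) = true := by simpa using hmem
      simp only [List.filter_cons, hd, if_true, List.map_cons, List.cons_append, if_neg hmem]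
      have hj : pvFL graph (cur ++ [node]) < k :=
        lt_of_lt_of_le (pvFL_lt (hm node List.mem_cons_self) hmem) hk
      rw [IH _ hj node cur (((t.filter (fun c => decide (c ∉ cur))).map (fun c => (c, cur))) ++ rest) (le_refl _)]
      cases hA : myTraverse graph node end_ cur with
      | none =>
        simp only [Option.getD_none, ne_eq, not_true_eq_false, if_false]
        exact ih _
      | some w =>
        have hw : (cur.length : Int) ≤ w := pvA_pos graph end_ _ node cur w (le_refl _) hA
        have hlen : 0 < cur.length := List.length_pos_iff.mpr hcur
        have hw0 : ¬ w = 0 := by omega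
        simp only [Option.getD_some, ne_eq, hw0, not_false_eq_true, if_true]

-- the stack machine processes its top frame exactly as a recursive call of A
theorem pvGo_cons (graph : List (String × List String)) (end_ : String) :
    ∀ k node pre rest, pvFL graph (pre ++ [node]) ≤ k →
      myTraverseGo graph end_ ((node, pre) :: rest)
        = match myTraverse graph node end_ pre with
          | some v => some v
          | none => myTraverseGo graph end_ rest := by
  intro k
  induction k using Nat.strong_induction_on with
  | _ k IH =>
    intro node pre rest hk
    rw [myTraverseGo.eq_def, myTraverse.eq_def]
    by_cases hne : node = end_
    · simp only [if_pos hne]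
      rw [PySem.List.slice_to_neg_one, List.dropLast_concat]
      simp [List.length_append]
    · simp only [if_neg hne]
      split
      · rename_i hlk
        rfl
      · rename_i nbrs hlk
        rw [pvFoldPush]
        exact pvGoLoop graph end_ (pre ++ [node]) rest k (by simp) hk
          (fun j hj => IH j hj) nbrs (pvMem_allNbrs hlk)

-- ===== VERDICT (by name: the statement is the Claim_ definition above) =====
-- ===== VERDICT (by name: the statement is the Claim_ definition above) =====
theorem myTraverse_spec : Claim_equal_myTraverse := by
  intro graph start end_ path _
  unfold Spec_myTraverse myTraverse_alt
  rw [pvGo_cons graph end_ (pvFL graph (path ++ [start])) start path [] (le_refl _)]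
  cases h : myTraverse graph start end_ path with
  | none => simp [myTraverseGo]
  | some v => simp
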